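-- pv_equiv track=rewrite | github.com/bourgeron-lab/lodlink | src/lodlink/lod_engine.py | _ibs
-- ===== SOURCE A (Python) =====
-- def _ibs(g1, g2):
--     a = [(0, 0), (0, 1), (1, 1)][g1]
--     b = list([(0, 0), (0, 1), (1, 1)][g2])
--     s = 0
--     for x in a:
--         if x in b:
--             s += 1
--             b.remove(x)
--     return s
-- ===== SOURCE B (Python) =====
-- def _ibs(g1, g2):
--     a = [(0, 0), (0, 1), (1, 1)][g1]
--     b = [(0, 0), (0, 1), (1, 1)][g2]
--     return 2 - abs(sum(a) - sum(b))
-- ===== Notes on version B (the rewrite author's own statement) =====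
-- stated objective: simpler
-- what changed: Replaces the multiset-intersection loop with element removal by the closed-form IBS identity 2 - |dosage(g1) - dosage(g2)|, keeping the same table lookups.
import Mathlib
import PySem

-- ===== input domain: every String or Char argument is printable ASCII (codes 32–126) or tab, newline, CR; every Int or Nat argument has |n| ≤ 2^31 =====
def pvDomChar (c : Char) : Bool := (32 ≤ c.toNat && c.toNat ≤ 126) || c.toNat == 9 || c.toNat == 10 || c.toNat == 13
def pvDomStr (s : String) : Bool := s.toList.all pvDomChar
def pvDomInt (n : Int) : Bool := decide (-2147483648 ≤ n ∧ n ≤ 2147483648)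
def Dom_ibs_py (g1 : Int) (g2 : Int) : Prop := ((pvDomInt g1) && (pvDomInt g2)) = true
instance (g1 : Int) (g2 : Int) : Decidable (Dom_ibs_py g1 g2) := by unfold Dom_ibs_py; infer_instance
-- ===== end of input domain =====

-- B replaces the remove-loop multiset intersection with the closed form 2 - |dosage(g1) - dosage(g2)| (same table lookups); simpler, not faster.


-- ===== PORT A =====
-- the lookup table [(0,0),(0,1),(1,1)]; the tuple is modelled as a 2-element list so the
-- for-loop over its elements transliterates directly
def ibsTable : List (List Int) := [[0, 0], [0, 1], [1, 1]]

-- 'for x in a: if x in b: s += 1; b.remove(x)'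
def ibsLoop : List Int → List Int → Int → Int
  | [], _, s => s
  | x :: xs, b, s =>
    if x ∈ b then ibsLoop xs ((PySem.List.remove? b x).getD b) (s + 1)
    else ibsLoop xs b s

def ibs_py (g1 : Int) (g2 : Int) : Int :=
  match PySem.List.pyGet? ibsTable g1, PySem.List.pyGet? ibsTable g2 with
  | some a, some b => ibsLoop a b 0
  | _, _ => 0  -- IndexError: excluded by Pre_ibs_py

-- ===== PORT B =====
-- 'return 2 - abs(sum(a) - sum(b))' after the same two indexings (none = IndexError, excluded by Pre_)
def ibs_py_alt (g1 : Int) (g2 : Int) : Int :=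
  (((PySem.List.pyGet? [[(0:Int), 0], [0, 1], [1, 1]] g1).bind fun a =>
    (PySem.List.pyGet? [[(0:Int), 0], [0, 1], [1, 1]] g2).map fun b =>
      2 - |a.sum - b.sum|).getD 0)

-- ===== PRECONDITION & SPEC =====
-- A (and B) raise IndexError when either genotype index is outside the list's range -3..2
def Pre_ibs_py (g1 : Int) (g2 : Int) : Prop :=
  PySem.Raise.InRange 3 g1 ∧ PySem.Raise.InRange 3 g2
instance (g1 : Int) (g2 : Int) : Decidable (Pre_ibs_py g1 g2) := by unfold Pre_ibs_py; infer_instance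
def pvWitness_ibs_py : Int × Int := (1, 2)

def Spec_ibs_py (g1 : Int) (g2 : Int) (out : Int) : Prop := out = ibs_py_alt g1 g2
instance (g1 : Int) (g2 : Int) (out : Int) : Decidable (Spec_ibs_py g1 g2 out) := by unfold Spec_ibs_py; infer_instance

-- ===== CLAIM (what is proved, stated in full; the proofs are below) =====
def Claim_equal_ibs_py : Prop := ∀ (g1 : Int) (g2 : Int), Dom_ibs_py g1 g2 → Pre_ibs_py g1 g2 → Spec_ibs_py g1 g2 (ibs_py g1 g2)

-- ===== LEMMAS AND PROOFS =====

-- ===== VERDICT (by name: the statement is the Claim_ definition above) =====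
theorem ibs_py_spec : Claim_equal_ibs_py := by
  intro g1 g2 _ hpre
  obtain ⟨h1, h2⟩ := hpre
  unfold PySem.Raise.InRange at h1 h2
  unfold Spec_ibs_py
  obtain ⟨h1a, h1b⟩ := h1
  obtain ⟨h2a, h2b⟩ := h2
  interval_cases g1 <;> interval_cases g2 <;> decide
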